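-- pv_equiv track=rewrite | github.com/DuskTillDwan/Intro-To-Python | Assignment 6/csc242-901hw6.py | recNumCount
-- ===== SOURCE A (Python) =====
-- def recNumCount(s):
--     'Counts the occurences of numbers in a string'
--     if s == '':
--         return 0
--     elif s[-1].isnumeric():
--         return recNumCount(s[:-1])+1
--
--     else:
--         return(recNumCount(s[:-1]))
--     pass
-- ===== SOURCE B (Python) =====
-- def recNumCount(s):
--     'Counts the occurences of numbers in a string'
--     count = 0
--     for c in s:
--         if c.isnumeric():
--             count += 1
--     return count
-- ===== Notes on version B (the rewrite author's own statement) =====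
-- stated objective: simpler
-- what changed: Replaces the recursion that peels the last character and rebuilds s[:-1] each step with a single explicit left-to-right loop over the characters accumulating a counter.
import Mathlib
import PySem

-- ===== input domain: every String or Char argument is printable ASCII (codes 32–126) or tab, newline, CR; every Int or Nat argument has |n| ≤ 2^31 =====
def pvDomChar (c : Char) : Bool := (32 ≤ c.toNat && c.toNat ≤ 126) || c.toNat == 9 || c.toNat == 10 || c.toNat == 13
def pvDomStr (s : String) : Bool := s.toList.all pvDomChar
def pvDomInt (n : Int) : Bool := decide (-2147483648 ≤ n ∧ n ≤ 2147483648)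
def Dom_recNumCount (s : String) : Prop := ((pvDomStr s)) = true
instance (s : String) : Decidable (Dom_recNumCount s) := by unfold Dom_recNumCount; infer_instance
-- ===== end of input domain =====

-- B: explicit left-to-right counting loop instead of A's recursion peeling the last character (simpler, one pass).
-- ===== PORT A =====
-- A: if s == '' return 0; else recurse on s[:-1], adding 1 when s[-1].isnumeric() (ASCII: a digit).
def pvRecA : List Char → Int
  | [] => 0
  | c :: cs =>
    if PySem.Chars.isdigit ((c :: cs).getLast (by simp)) then
      pvRecA (c :: cs).dropLast + 1
    else
      pvRecA (c :: cs).dropLast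
termination_by l => l.length
decreasing_by all_goals simp [List.length_dropLast]

def recNumCount (s : String) : Int := pvRecA s.toList

-- ===== PORT B =====
def recNumCount_alt (s : String) : Int :=
  s.toList.foldl (fun count c => if PySem.Chars.isdigit c then count + 1 else count) 0

-- ===== PRECONDITION & SPEC =====
def Spec_recNumCount (s : String) (out : Int) : Prop := out = recNumCount_alt s
instance (s : String) (out : Int) : Decidable (Spec_recNumCount s out) := by unfold Spec_recNumCount; infer_instance

-- ===== CLAIM (what is proved, stated in full; the proofs are below) =====
def Claim_equal_recNumCount : Prop := ∀ (s : String), Dom_recNumCount s → Spec_recNumCount s (recNumCount s)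

-- ===== LEMMAS AND PROOFS =====

-- ===== VERDICT (by name: the statement is the Claim_ definition above) =====
-- A's recursion computes the number of digit characters.
theorem pvRecA_eq_countP (l : List Char) :
    pvRecA l = (l.countP PySem.Chars.isdigit : Int) := by
  induction l using pvRecA.induct with
  | case1 => simp [pvRecA]
  | case2 c cs h ih =>
    have hne : (c :: cs) ≠ ([] : List Char) := by simp
    have hsplit : (c :: cs).dropLast ++ [(c :: cs).getLast hne] = c :: cs :=
      List.dropLast_append_getLast hne
    rw [pvRecA, if_pos h, ih, ← hsplit, List.countP_append]
    simp [h]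
  | case3 c cs h ih =>
    have hne : (c :: cs) ≠ ([] : List Char) := by simp
    have hsplit : (c :: cs).dropLast ++ [(c :: cs).getLast hne] = c :: cs :=
      List.dropLast_append_getLast hne
    rw [pvRecA, if_neg h, ih, ← hsplit, List.countP_append]
    simp [h]

-- B's loop computes the same count.
theorem pvFold_eq_countP (l : List Char) (a : Int) :
    l.foldl (fun count c => if PySem.Chars.isdigit c then count + 1 else count) a
      = a + (l.countP PySem.Chars.isdigit : Int) := by
  induction l generalizing a with
  | nil => simp
  | cons c cs ih =>
    by_cases h : PySem.Chars.isdigit c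
    · simp [List.foldl, h, ih]
      ring
    · simp [List.foldl, h, ih]

-- ===== VERDICT (by name: the statement is the Claim_ definition above) =====
theorem recNumCount_spec : Claim_equal_recNumCount := by
  intro s _
  unfold Spec_recNumCount recNumCount recNumCount_alt
  rw [pvRecA_eq_countP, pvFold_eq_countP]
  simp
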